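-- pv_equiv track=rewrite | github.com/L0GIN0UT/KursachFateeva | Sort.py | sortByTypeOfKitchen
-- ===== SOURCE A (Python) =====
-- def sortByTypeOfKitchen(choice, restaurants):
--     newRestaurans = []
--     for rest in restaurants:
--         if rest[1] == "European" and choice == 1:
--             newRestaurans.append(rest)
--         if rest[1] == "Seafood" and choice == 2:
--             newRestaurans.append(rest)
--         if rest[1] == "Italian" and choice == 3:
--             newRestaurans.append(rest)
--         if rest[1] == "American" and choice == 4:
--             newRestaurans.append(rest)
--         if rest[1] == "Asian" and choice == 5:
--             newRestaurans.append(rest)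
--         if rest[1] == "Irish" and choice == 6:
--             newRestaurans.append(rest)
--         if rest[1] == "Georgian" and choice == 7:
--             newRestaurans.append(rest)
--         if rest[1] == "Russian" and choice == 8:
--             newRestaurans.append(rest)
--         if rest[1] == "Street food" and choice == 9:
--             newRestaurans.append(rest)
--         if rest[1] == "French" and choice == 10:
--             newRestaurans.append(rest)
--     return newRestaurans
-- ===== SOURCE B (Python) =====
-- def sortByTypeOfKitchen(choice, restaurants):
--     # Stage 1: group all restaurants by their cuisine field into a hash index.
--     buckets = {}
--     for rest in restaurants:
--         buckets.setdefault(rest[1], []).append(rest)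
--     # Stage 2: resolve the choice to a cuisine name and return its bucket.
--     cuisines = ("European", "Seafood", "Italian", "American", "Asian",
--                 "Irish", "Georgian", "Russian", "Street food", "French")
--     if not 1 <= choice <= 10:
--         return []
--     return buckets.get(cuisines[choice - 1], [])
-- ===== Notes on version B (the rewrite author's own statement) =====
-- stated objective: alternative
-- what changed: B first groups all restaurants into a cuisine->list hash index in one choice-independent pass, then resolves choice via an indexed cuisine tuple and returns the looked-up bucket, instead of A's per-element chain of ten choice tests.
import Mathlib
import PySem

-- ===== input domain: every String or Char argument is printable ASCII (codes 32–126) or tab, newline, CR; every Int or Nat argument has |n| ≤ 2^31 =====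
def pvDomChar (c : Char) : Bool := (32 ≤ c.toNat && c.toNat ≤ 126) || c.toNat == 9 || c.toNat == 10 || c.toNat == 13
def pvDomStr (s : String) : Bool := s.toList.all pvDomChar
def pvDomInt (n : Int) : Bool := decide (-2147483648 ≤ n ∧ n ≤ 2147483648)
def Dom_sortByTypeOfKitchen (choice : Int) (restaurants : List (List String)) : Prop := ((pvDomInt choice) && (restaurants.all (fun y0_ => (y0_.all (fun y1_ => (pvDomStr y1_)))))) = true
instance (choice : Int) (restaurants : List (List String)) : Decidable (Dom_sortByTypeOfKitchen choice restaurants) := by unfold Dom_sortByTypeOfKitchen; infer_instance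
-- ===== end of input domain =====

-- B groups all restaurants into a cuisine->list hash index in one choice-independent pass,
-- then resolves choice through an indexed cuisine tuple and returns the looked-up bucket.
-- ===== PORT A =====
def sortByTypeOfKitchen (choice : Int) (restaurants : List (List String)) : List (List String) :=
  restaurants.foldl (fun newRestaurans rest =>
    let n1 := if PySem.List.pyGet? rest 1 == some "European" && choice == 1 then newRestaurans ++ [rest] else newRestaurans
    let n2 := if PySem.List.pyGet? rest 1 == some "Seafood" && choice == 2 then n1 ++ [rest] else n1
    let n3 := if PySem.List.pyGet? rest 1 == some "Italian" && choice == 3 then n2 ++ [rest] else n2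
    let n4 := if PySem.List.pyGet? rest 1 == some "American" && choice == 4 then n3 ++ [rest] else n3
    let n5 := if PySem.List.pyGet? rest 1 == some "Asian" && choice == 5 then n4 ++ [rest] else n4
    let n6 := if PySem.List.pyGet? rest 1 == some "Irish" && choice == 6 then n5 ++ [rest] else n5
    let n7 := if PySem.List.pyGet? rest 1 == some "Georgian" && choice == 7 then n6 ++ [rest] else n6
    let n8 := if PySem.List.pyGet? rest 1 == some "Russian" && choice == 8 then n7 ++ [rest] else n7
    let n9 := if PySem.List.pyGet? rest 1 == some "Street food" && choice == 9 then n8 ++ [rest] else n8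
    let n10 := if PySem.List.pyGet? rest 1 == some "French" && choice == 10 then n9 ++ [rest] else n9
    n10) []

-- ===== PORT B =====
-- the tuple 'cuisines' of Source B
def pvCuisines : List String :=
  ["European", "Seafood", "Italian", "American", "Asian",
   "Irish", "Georgian", "Russian", "Street food", "French"]

-- buckets.setdefault(rest[1], []).append(rest) = modify key [] (· ++ [rest]);
-- the key is rest[1] as an Option (always 'some' under Pre_, where Python B returns).
def sortByTypeOfKitchen_alt (choice : Int) (restaurants : List (List String)) : List (List String) :=
  let buckets : PySem.Dict (Option String) (List (List String)) :=
    restaurants.foldl (fun b rest => b.modify (PySem.List.pyGet? rest 1) [] (· ++ [rest])) PySem.Dict.empty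
  if 1 ≤ choice ∧ choice ≤ 10 then
    match PySem.List.pyGet? pvCuisines (choice - 1) with
    | some target => buckets.getD (some target) []
    | none => []
  else []

-- ===== PRECONDITION & SPEC =====
-- Pre_ excludes exactly the inputs where A raises IndexError: some restaurant entry with fewer than 2 fields.
def Pre_sortByTypeOfKitchen (choice : Int) (restaurants : List (List String)) : Prop :=
  (restaurants.all (fun rest => 2 ≤ rest.length)) = true
instance (choice : Int) (restaurants : List (List String)) : Decidable (Pre_sortByTypeOfKitchen choice restaurants) := by unfold Pre_sortByTypeOfKitchen; infer_instance
def pvWitness_sortByTypeOfKitchen : Int × List (List String) := (1, [["Cafe", "European"], ["Bar", "Seafood"]])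

def Spec_sortByTypeOfKitchen (choice : Int) (restaurants : List (List String)) (out : List (List String)) : Prop := out = sortByTypeOfKitchen_alt choice restaurants
instance (choice : Int) (restaurants : List (List String)) (out : List (List String)) : Decidable (Spec_sortByTypeOfKitchen choice restaurants out) := by unfold Spec_sortByTypeOfKitchen; infer_instance

-- ===== CLAIM (what is proved, stated in full; the proofs are below) =====
def Claim_equal_sortByTypeOfKitchen : Prop := ∀ (choice : Int) (restaurants : List (List String)), Dom_sortByTypeOfKitchen choice restaurants → Pre_sortByTypeOfKitchen choice restaurants → Spec_sortByTypeOfKitchen choice restaurants (sortByTypeOfKitchen choice restaurants)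

-- ===== LEMMAS AND PROOFS =====

-- the cuisine the choice selects, if any
def pvTargetOf (choice : Int) : Option String :=
  if 1 ≤ choice ∧ choice ≤ 10 then PySem.List.pyGet? pvCuisines (choice - 1) else none

def pvMatches (choice : Int) (rest : List String) : Bool :=
  match pvTargetOf choice with
  | none => false
  | some t => PySem.List.pyGet? rest 1 == some t

-- A's ten-conditional loop body is exactly 'append iff pvMatches'.
lemma pvBody_eq (choice : Int) :
    (fun (newRestaurans : List (List String)) (rest : List String) =>
      let n1 := if PySem.List.pyGet? rest 1 == some "European" && choice == 1 then newRestaurans ++ [rest] else newRestaurans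
      let n2 := if PySem.List.pyGet? rest 1 == some "Seafood" && choice == 2 then n1 ++ [rest] else n1
      let n3 := if PySem.List.pyGet? rest 1 == some "Italian" && choice == 3 then n2 ++ [rest] else n2
      let n4 := if PySem.List.pyGet? rest 1 == some "American" && choice == 4 then n3 ++ [rest] else n3
      let n5 := if PySem.List.pyGet? rest 1 == some "Asian" && choice == 5 then n4 ++ [rest] else n4
      let n6 := if PySem.List.pyGet? rest 1 == some "Irish" && choice == 6 then n5 ++ [rest] else n5
      let n7 := if PySem.List.pyGet? rest 1 == some "Georgian" && choice == 7 then n6 ++ [rest] else n6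
      let n8 := if PySem.List.pyGet? rest 1 == some "Russian" && choice == 8 then n7 ++ [rest] else n7
      let n9 := if PySem.List.pyGet? rest 1 == some "Street food" && choice == 9 then n8 ++ [rest] else n8
      let n10 := if PySem.List.pyGet? rest 1 == some "French" && choice == 10 then n9 ++ [rest] else n9
      n10)
    = (fun acc rest => if pvMatches choice rest then acc ++ [rest] else acc) := by
  funext acc rest
  by_cases h1 : choice = 1
  · subst h1; simp [pvMatches, pvTargetOf, pvCuisines, PySem.List.pyGet?, PySem.List.pyIdx?]
  by_cases h2 : choice = 2
  · subst h2; simp [pvMatches, pvTargetOf, pvCuisines, PySem.List.pyGet?, PySem.List.pyIdx?]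
  by_cases h3 : choice = 3
  · subst h3; simp [pvMatches, pvTargetOf, pvCuisines, PySem.List.pyGet?, PySem.List.pyIdx?]
  by_cases h4 : choice = 4
  · subst h4; simp [pvMatches, pvTargetOf, pvCuisines, PySem.List.pyGet?, PySem.List.pyIdx?]
  by_cases h5 : choice = 5
  · subst h5; simp [pvMatches, pvTargetOf, pvCuisines, PySem.List.pyGet?, PySem.List.pyIdx?]
  by_cases h6 : choice = 6
  · subst h6; simp [pvMatches, pvTargetOf, pvCuisines, PySem.List.pyGet?, PySem.List.pyIdx?]
  by_cases h7 : choice = 7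
  · subst h7; simp [pvMatches, pvTargetOf, pvCuisines, PySem.List.pyGet?, PySem.List.pyIdx?]
  by_cases h8 : choice = 8
  · subst h8; simp [pvMatches, pvTargetOf, pvCuisines, PySem.List.pyGet?, PySem.List.pyIdx?]
  by_cases h9 : choice = 9
  · subst h9; simp [pvMatches, pvTargetOf, pvCuisines, PySem.List.pyGet?, PySem.List.pyIdx?]
  by_cases h10 : choice = 10
  · subst h10; simp [pvMatches, pvTargetOf, pvCuisines, PySem.List.pyGet?, PySem.List.pyIdx?]
  · have hr : ¬ (1 ≤ choice ∧ choice ≤ 10) := by omega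
    simp [pvMatches, pvTargetOf, hr, h1, h2, h3, h4, h5, h6, h7, h8, h9, h10]

-- B's grouping pass: each bucket is exactly the sublist of restaurants with that key.
lemma pvBucket_getD (l : List (List String)) (d : PySem.Dict (Option String) (List (List String)))
    (k : Option String) :
    (l.foldl (fun b rest => b.modify (PySem.List.pyGet? rest 1) [] (· ++ [rest])) d).getD k []
      = d.getD k [] ++ l.filter (fun rest => PySem.List.pyGet? rest 1 == k) := by
  induction l generalizing d with
  | nil => simp
  | cons r t ih =>
    simp only [List.foldl_cons, List.filter_cons]
    rw [ih, PySem.Dict.getD_modify]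
    by_cases h : k = PySem.List.pyGet? r 1
    · simp [h, List.append_assoc]
    · have h' : (PySem.List.pyGet? r 1 == k) = false := by
        cases hb : PySem.List.pyGet? r 1 == k
        · rfl
        · exact absurd (eq_of_beq hb).symm h
      simp [h, h']

-- B is the same filter.
lemma pvAlt_eq_filter (choice : Int) (restaurants : List (List String)) :
    sortByTypeOfKitchen_alt choice restaurants = restaurants.filter (pvMatches choice) := by
  unfold sortByTypeOfKitchen_alt
  by_cases hr : 1 ≤ choice ∧ choice ≤ 10
  · have ht : pvTargetOf choice = PySem.List.pyGet? pvCuisines (choice - 1) := by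
      simp [pvTargetOf, hr]
    cases hEq : PySem.List.pyGet? pvCuisines (choice - 1) with
    | none =>
      exfalso
      obtain ⟨ha, hb⟩ := hr
      interval_cases choice <;>
        simp [pvCuisines, PySem.List.pyGet?, PySem.List.pyIdx?] at hEq
    | some t =>
      have hp : pvMatches choice = fun rest => PySem.List.pyGet? rest 1 == some t := by
        funext rest; simp [pvMatches, ht, hEq]
      simp only [hr, hEq, pvBucket_getD, PySem.Dict.getD_empty, List.nil_append, hp]
      simp
  · have ht : pvTargetOf choice = none := by simp [pvTargetOf, hr]
    have hp : pvMatches choice = fun _ => false := by funext rest; simp [pvMatches, ht]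
    simp [hr, hp]

-- ===== VERDICT (by name: the statement is the Claim_ definition above) =====
theorem sortByTypeOfKitchen_spec : Claim_equal_sortByTypeOfKitchen := by
  intro choice restaurants _ _
  unfold Spec_sortByTypeOfKitchen sortByTypeOfKitchen
  rw [pvBody_eq, PySem.List.foldl_append_if_eq_filter, pvAlt_eq_filter]
  simp
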